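-- pv_equiv track=rewrite | github.com/teratensor/Prediction | 4_backtest/analyze_optimal_candidates.py | get_ord4_rank
-- ===== SOURCE A (Python) =====
-- HOT_BITS = {29, 17, 27, 3, 25, 1, 19, 39, 4, 31, 37, 33, 10, 2, 32}
--
-- COLD_BITS = {41, 43, 8, 14, 34, 26, 22, 44, 20, 7, 30, 15, 11, 40, 6}
--
-- BALL4_STATS = {30: 26, 26: 19, 29: 18, 35: 18, 27: 18, 23: 18, 33: 17, 28: 16, 22: 16, 32: 16, 31: 16, 21: 15, 24: 15, 25: 14, 19: 14, 20: 13}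
--
-- GAP34_STATS = {1: 46, 2: 54, 3: 44, 4: 37, 5: 24, 6: 30, 7: 25, 8: 22, 9: 18, 10: 18}
--
-- ORD4_BIT_FREQ = {27: 23, 28: 22, 25: 20, 24: 19, 29: 19, 31: 18, 21: 17, 17: 17, 32: 17, 33: 17, 23: 16}
--
-- UNEXPECTED_NUMBERS = {14, 37, 15, 36, 13, 34, 17, 40, 39, 41, 11, 12, 43, 42, 8}
--
-- def get_ord4_rank(ord1, ord2, ord3, ord4, ord6):
--     min_ord4 = ord3 + 1
--     max_ord4 = ord6 - 1
--     if min_ord4 > max_ord4 or ord4 < min_ord4 or ord4 > max_ord4: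
--         return -1
--
--     candidates = []
--     for o4 in range(min_ord4, max_ord4 + 1):
--         score = 0
--         if o4 in BALL4_STATS:
--             score += BALL4_STATS[o4]
--         if o4 in UNEXPECTED_NUMBERS:
--             score += 15
--         if 20 <= o4 <= 29:
--             score += 8
--         elif 30 <= o4 <= 39:
--             score += 6
--         gap = o4 - ord3
--         if gap in GAP34_STATS:
--             score += GAP34_STATS[gap] // 4
--         if o4 in ORD4_BIT_FREQ:
--             score += ORD4_BIT_FREQ[o4] // 2
--         if o4 in COLD_BITS:
--             score += 12
--         elif o4 in HOT_BITS:
--             score -= 3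
--         candidates.append((o4, score))
--
--     candidates.sort(key=lambda x: -x[1])
--     for i, (o, _) in enumerate(candidates):
--         if o == ord4:
--             return i + 1
--     return -1
-- ===== SOURCE B (Python) =====
-- # Same ranking without building/sorting the candidate list: ord4's score is computed
-- # once from a precomputed merged base table, then one counting pass gives the rank.
--
-- # Merged per-number score table: BALL4_STATS + 15*unexpected + decade bonus
-- # + ORD4_BIT_FREQ//2 + cold/hot adjustment, precomputed for every number it is
-- # nonzero on (all contributions vanish outside 1..44).
-- _BASE = {1: -3, 2: -3, 3: -3, 4: -3, 6: 12, 7: 12, 8: 27, 10: -3, 11: 27,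
--          12: 15, 13: 15, 14: 27, 15: 27, 17: 20, 19: 11, 20: 33, 21: 31,
--          22: 36, 23: 34, 24: 32, 25: 29, 26: 39, 27: 34, 28: 35, 29: 32,
--          30: 44, 31: 28, 32: 27, 33: 28, 34: 33, 35: 24, 36: 21, 37: 18,
--          38: 6, 39: 18, 40: 27, 41: 27, 42: 15, 43: 27, 44: 12}
--
-- _GAP = {1: 46, 2: 54, 3: 44, 4: 37, 5: 24, 6: 30, 7: 25, 8: 22, 9: 18, 10: 18}
--
--
-- def get_ord4_rank(ord1, ord2, ord3, ord4, ord6):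
--     min_ord4 = ord3 + 1
--     max_ord4 = ord6 - 1
--     if min_ord4 > max_ord4 or ord4 < min_ord4 or ord4 > max_ord4:
--         return -1
--     s = _BASE.get(ord4, 0) + _GAP.get(ord4 - ord3, 0) // 4
--     rank = 1
--     for o in range(min_ord4, max_ord4 + 1):
--         sc = _BASE.get(o, 0) + _GAP.get(o - ord3, 0) // 4
--         if sc > s or (sc == s and o < ord4):
--             rank += 1
--     return rank
-- ===== Notes on version B (the rewrite author's own statement) =====
-- stated objective: simpler
-- what changed: Instead of building the (o4, score) candidate list, stable-sorting it by descending score and scanning for ord4, B computes ord4's score once from a precomputed merged base-score table and makes a single counting pass: rank = 1 + #candidates scoring higher + #equal-scoring candidates with smaller o4 (exactly the stable sort's tie order).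
import Mathlib
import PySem

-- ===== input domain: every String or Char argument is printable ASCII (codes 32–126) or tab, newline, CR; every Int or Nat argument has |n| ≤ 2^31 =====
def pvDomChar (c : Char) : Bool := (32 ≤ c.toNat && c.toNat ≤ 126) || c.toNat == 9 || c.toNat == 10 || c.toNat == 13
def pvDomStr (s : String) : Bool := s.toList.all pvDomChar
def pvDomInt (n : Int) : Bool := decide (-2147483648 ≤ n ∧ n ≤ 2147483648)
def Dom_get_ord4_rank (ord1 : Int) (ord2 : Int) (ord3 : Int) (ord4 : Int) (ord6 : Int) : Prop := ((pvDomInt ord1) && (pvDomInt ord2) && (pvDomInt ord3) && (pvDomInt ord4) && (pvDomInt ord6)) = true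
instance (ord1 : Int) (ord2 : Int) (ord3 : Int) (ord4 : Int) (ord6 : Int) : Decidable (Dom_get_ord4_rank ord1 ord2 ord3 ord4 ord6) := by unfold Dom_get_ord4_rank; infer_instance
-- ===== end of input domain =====

-- B replaces A's build-list + stable-sort + linear-scan ranking by a single counting
-- pass over the candidate range, using a precomputed merged per-number score table.

-- ===== PORT A =====
def pvHotBits : PySem.Set Int := PySem.Set.ofList [29,17,27,3,25,1,19,39,4,31,37,33,10,2,32]
def pvColdBits : PySem.Set Int := PySem.Set.ofList [41,43,8,14,34,26,22,44,20,7,30,15,11,40,6]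
def pvBall4Stats : PySem.Dict Int Int := PySem.Dict.ofList [(30,26),(26,19),(29,18),(35,18),(27,18),(23,18),(33,17),(28,16),(22,16),(32,16),(31,16),(21,15),(24,15),(25,14),(19,14),(20,13)]
def pvGap34Stats : PySem.Dict Int Int := PySem.Dict.ofList [(1,46),(2,54),(3,44),(4,37),(5,24),(6,30),(7,25),(8,22),(9,18),(10,18)]
def pvOrd4BitFreq : PySem.Dict Int Int := PySem.Dict.ofList [(27,23),(28,22),(25,20),(24,19),(29,19),(31,18),(21,17),(17,17),(32,17),(33,17),(23,16)]
def pvUnexpected : PySem.Set Int := PySem.Set.ofList [14,37,15,36,13,34,17,40,39,41,11,12,43,42,8]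

-- the body of A's candidate loop (score accumulation, statement for statement)
def pvScoreA (ord3 o4 : Int) : Int :=
  let score : Int := 0
  let score := if pvBall4Stats.contains o4 then score + pvBall4Stats.getD o4 0 else score
  let score := if PySem.Set.contains pvUnexpected o4 then score + 15 else score
  let score := if 20 ≤ o4 ∧ o4 ≤ 29 then score + 8
               else if 30 ≤ o4 ∧ o4 ≤ 39 then score + 6 else score
  let gap := o4 - ord3
  let score := if pvGap34Stats.contains gap then score + PySem.Int.floordiv (pvGap34Stats.getD gap 0) 4 else score
  let score := if pvOrd4BitFreq.contains o4 then score + PySem.Int.floordiv (pvOrd4BitFreq.getD o4 0) 2 else score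
  let score := if PySem.Set.contains pvColdBits o4 then score + 12
               else if PySem.Set.contains pvHotBits o4 then score - 3 else score
  score

-- A's final loop: for i, (o, _) in enumerate(candidates): if o == ord4: return i + 1; return -1
def pvFindRank : List (Int × Int) → Int → Int → Int
  | [], _, _ => -1
  | (o, _) :: rest, target, i => if o = target then i + 1 else pvFindRank rest target (i + 1)

def get_ord4_rank (ord1 : Int) (ord2 : Int) (ord3 : Int) (ord4 : Int) (ord6 : Int) : Int :=
  let min_ord4 := ord3 + 1
  let max_ord4 := ord6 - 1
  if min_ord4 > max_ord4 ∨ ord4 < min_ord4 ∨ ord4 > max_ord4 then -1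
  else
    let candidates := (PySem.List.pyRange min_ord4 (max_ord4 + 1) 1).foldl
      (fun acc o4 => acc ++ [(o4, pvScoreA ord3 o4)]) []
    let sortedC := PySem.List.sorted candidates (fun x => -x.2) false
    pvFindRank sortedC ord4 0

-- ===== PORT B =====
-- merged per-number base score table (nonzero exactly on 1..44), precomputed in Source B
def pvBase : PySem.Dict Int Int := PySem.Dict.ofList [(1,-3),(2,-3),(3,-3),(4,-3),(6,12),(7,12),(8,27),(10,-3),(11,27),(12,15),(13,15),(14,27),(15,27),(17,20),(19,11),(20,33),(21,31),(22,36),(23,34),(24,32),(25,29),(26,39),(27,34),(28,35),(29,32),(30,44),(31,28),(32,27),(33,28),(34,33),(35,24),(36,21),(37,18),(38,6),(39,18),(40,27),(41,27),(42,15),(43,27),(44,12)]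
def pvGapB : PySem.Dict Int Int := PySem.Dict.ofList [(1,46),(2,54),(3,44),(4,37),(5,24),(6,30),(7,25),(8,22),(9,18),(10,18)]

def get_ord4_rank_alt (ord1 : Int) (ord2 : Int) (ord3 : Int) (ord4 : Int) (ord6 : Int) : Int :=
  let min_ord4 := ord3 + 1
  let max_ord4 := ord6 - 1
  if min_ord4 > max_ord4 ∨ ord4 < min_ord4 ∨ ord4 > max_ord4 then -1
  else
    let s := pvBase.getD ord4 0 + PySem.Int.floordiv (pvGapB.getD (ord4 - ord3) 0) 4
    (PySem.List.pyRange min_ord4 (max_ord4 + 1) 1).foldl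
      (fun rank o =>
        let sc := pvBase.getD o 0 + PySem.Int.floordiv (pvGapB.getD (o - ord3) 0) 4
        if sc > s ∨ (sc = s ∧ o < ord4) then rank + 1 else rank) 1

-- ===== PRECONDITION & SPEC =====
def Spec_get_ord4_rank (ord1 : Int) (ord2 : Int) (ord3 : Int) (ord4 : Int) (ord6 : Int) (out : Int) : Prop := out = get_ord4_rank_alt ord1 ord2 ord3 ord4 ord6
instance (ord1 : Int) (ord2 : Int) (ord3 : Int) (ord4 : Int) (ord6 : Int) (out : Int) : Decidable (Spec_get_ord4_rank ord1 ord2 ord3 ord4 ord6 out) := by unfold Spec_get_ord4_rank; infer_instance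

-- ===== CLAIM (what is proved, stated in full; the proofs are below) =====
def Claim_equal_get_ord4_rank : Prop := ∀ (ord1 : Int) (ord2 : Int) (ord3 : Int) (ord4 : Int) (ord6 : Int), Dom_get_ord4_rank ord1 ord2 ord3 ord4 ord6 → Spec_get_ord4_rank ord1 ord2 ord3 ord4 ord6 (get_ord4_rank ord1 ord2 ord3 ord4 ord6)

-- ===== LEMMAS AND PROOFS =====

-- B's inline per-candidate score, named for the proofs
def pvScoreB (ord3 o : Int) : Int :=
  pvBase.getD o 0 + PySem.Int.floordiv (pvGapB.getD (o - ord3) 0) 4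

-- A's score split into a part depending on o4 only and the gap part
def pvBaseA (o4 : Int) : Int :=
  (if pvBall4Stats.contains o4 then pvBall4Stats.getD o4 0 else 0)
  + (if PySem.Set.contains pvUnexpected o4 then 15 else 0)
  + (if 20 ≤ o4 ∧ o4 ≤ 29 then 8 else if 30 ≤ o4 ∧ o4 ≤ 39 then 6 else 0)
  + (if pvOrd4BitFreq.contains o4 then PySem.Int.floordiv (pvOrd4BitFreq.getD o4 0) 2 else 0)
  + (if PySem.Set.contains pvColdBits o4 then 12 else if PySem.Set.contains pvHotBits o4 then -3 else 0)

def pvGapTerm (g : Int) : Int :=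
  if pvGap34Stats.contains g then PySem.Int.floordiv (pvGap34Stats.getD g 0) 4 else 0

set_option maxHeartbeats 1600000 in
theorem pv_scoreA_decomp (ord3 o : Int) :
    pvScoreA ord3 o = pvBaseA o + pvGapTerm (o - ord3) := by
  simp only [pvScoreA, pvBaseA, pvGapTerm]
  split_ifs <;> ring

theorem pv_gapTerm_eq (g : Int) :
    pvGapTerm g = PySem.Int.floordiv (pvGap34Stats.getD g 0) 4 := by
  unfold pvGapTerm
  by_cases hc : pvGap34Stats.contains g
  · rw [if_pos hc]
  · rw [if_neg hc, PySem.Dict.getD_of_not_contains (h := by simpa using hc)]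
    decide

set_option maxRecDepth 10000 in
theorem pv_base_in (o : Int) (h1 : 1 ≤ o) (h2 : o ≤ 44) : pvBaseA o = pvBase.getD o 0 := by
  interval_cases o <;> decide

theorem pv_base_out (o : Int) (h : o < 1 ∨ 44 < o) : pvBaseA o = 0 := by
  have hb : pvBall4Stats.contains o = false := by
    cases hx : pvBall4Stats.contains o
    · rfl
    · exfalso
      rw [show pvBall4Stats = PySem.Dict.mk [(30,26),(26,19),(29,18),(35,18),(27,18),(23,18),(33,17),(28,16),(22,16),(32,16),(31,16),(21,15),(24,15),(25,14),(19,14),(20,13)] from by decide] at hx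
      simp [PySem.Dict.contains_mk] at hx
      omega
  have hf : pvOrd4BitFreq.contains o = false := by
    cases hx : pvOrd4BitFreq.contains o
    · rfl
    · exfalso
      rw [show pvOrd4BitFreq = PySem.Dict.mk [(27,23),(28,22),(25,20),(24,19),(29,19),(31,18),(21,17),(17,17),(32,17),(33,17),(23,16)] from by decide] at hx
      simp [PySem.Dict.contains_mk] at hx
      omega
  have hu : PySem.Set.contains pvUnexpected o = false := by
    cases hx : PySem.Set.contains pvUnexpected o
    · rfl
    · exfalso
      rw [PySem.Set.contains_iff] at hx
      rw [show pvUnexpected = ([14,37,15,36,13,34,17,40,39,41,11,12,43,42,8] : List Int) from by decide] at hx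
      simp at hx; omega
  have hcold : PySem.Set.contains pvColdBits o = false := by
    cases hx : PySem.Set.contains pvColdBits o
    · rfl
    · exfalso
      rw [PySem.Set.contains_iff] at hx
      rw [show pvColdBits = ([41,43,8,14,34,26,22,44,20,7,30,15,11,40,6] : List Int) from by decide] at hx
      simp at hx; omega
  have hhot : PySem.Set.contains pvHotBits o = false := by
    cases hx : PySem.Set.contains pvHotBits o
    · rfl
    · exfalso
      rw [PySem.Set.contains_iff] at hx
      rw [show pvHotBits = ([29,17,27,3,25,1,19,39,4,31,37,33,10,2,32] : List Int) from by decide] at hx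
      simp at hx; omega
  unfold pvBaseA
  rw [hb, hf, hu, hcold, hhot]
  simp only [Bool.false_eq_true, if_false]
  rw [if_neg (by omega), if_neg (by omega)]
  ring

set_option maxRecDepth 10000 in
theorem pv_baseD_out (o : Int) (h : o < 1 ∨ 44 < o) : pvBase.getD o 0 = 0 := by
  apply PySem.Dict.getD_of_not_contains
  cases hx : pvBase.contains o
  · rfl
  · exfalso
    rw [show pvBase = PySem.Dict.mk [(1,-3),(2,-3),(3,-3),(4,-3),(6,12),(7,12),(8,27),(10,-3),(11,27),(12,15),(13,15),(14,27),(15,27),(17,20),(19,11),(20,33),(21,31),(22,36),(23,34),(24,32),(25,29),(26,39),(27,34),(28,35),(29,32),(30,44),(31,28),(32,27),(33,28),(34,33),(35,24),(36,21),(37,18),(38,6),(39,18),(40,27),(41,27),(42,15),(43,27),(44,12)] from by decide] at hx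
    simp [PySem.Dict.contains_mk] at hx
    omega

theorem pv_score_eq (ord3 o : Int) : pvScoreA ord3 o = pvScoreB ord3 o := by
  rw [pv_scoreA_decomp, pv_gapTerm_eq]
  unfold pvScoreB
  rw [show pvGapB = pvGap34Stats from by decide]
  by_cases h : 1 ≤ o ∧ o ≤ 44
  · rw [pv_base_in o h.1 h.2]
  · rw [pv_base_out o (by omega), pv_baseD_out o (by omega)]

-- A's find loop is "index of the unique fst-match, plus one"
theorem pv_find_eq_idx (t : Int × Int) (l : List (Int × Int)) (i : Int)
    (hu : ∀ p ∈ l, p.1 = t.1 → p = t) (ht : t ∈ l) :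
    pvFindRank l t.1 i = i + (List.idxOf t l : Int) + 1 := by
  induction l generalizing i with
  | nil => simp at ht
  | cons q rest ih =>
    obtain ⟨o, sc⟩ := q
    by_cases hq : o = t.1
    · have hqt : (o, sc) = t := hu (o, sc) List.mem_cons_self hq
      rw [show pvFindRank ((o, sc) :: rest) t.1 i = i + 1 from by simp [pvFindRank, hq]]
      rw [hqt, List.idxOf_cons_self]
      simp
    · have hne : (o, sc) ≠ t := fun hh => hq (congrArg Prod.fst hh)
      have htr : t ∈ rest := by
        rcases List.mem_cons.1 ht with hh | hh
        · exact absurd hh.symm hne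
        · exact hh
      rw [show pvFindRank ((o, sc) :: rest) t.1 i = pvFindRank rest t.1 (i + 1) from by
            simp [pvFindRank, hq]]
      rw [ih (i + 1) (fun p hp => hu p (List.mem_cons_of_mem _ hp)) htr,
        List.idxOf_cons_ne _ hne]
      push_cast
      omega

-- stability of the insertion sort behind PySem.List.sorted, as rank equations
theorem pv_pairwise_insertBy {α : Type} (key : α → Int) (x : α) (acc : List α)
    (h : acc.Pairwise (fun p q => key p ≤ key q)) :
    (PySem.List.insertBy (fun p q => decide (key p < key q)) x acc).Pairwise
      (fun p q => key p ≤ key q) := by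
  induction acc with
  | nil => simp [PySem.List.insertBy]
  | cons e rest ih =>
    rw [List.pairwise_cons] at h
    obtain ⟨he, hrest⟩ := h
    show (if decide (key x < key e) = true then x :: e :: rest
          else e :: PySem.List.insertBy _ x rest).Pairwise _
    split_ifs with hc
    · simp only [decide_eq_true_eq] at hc
      refine List.pairwise_cons.2 ⟨?_, List.pairwise_cons.2 ⟨he, hrest⟩⟩
      intro q hq
      rcases List.mem_cons.1 hq with rfl | hq
      · omega
      · have := he q hq; omega
    · simp only [decide_eq_true_eq, not_lt] at hc
      refine List.pairwise_cons.2 ⟨?_, ih hrest⟩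
      intro q hq
      rcases (PySem.List.mem_insertBy _ _ _ _).1 hq with rfl | hq
      · omega
      · exact he q hq

theorem pv_idxOf_insertBy_self {α : Type} [BEq α] [LawfulBEq α] (key : α → Int) (t : α) (acc : List α)
    (h : acc.Pairwise (fun p q => key p ≤ key q)) (ht : t ∉ acc) :
    List.idxOf t (PySem.List.insertBy (fun p q => decide (key p < key q)) t acc)
      = acc.countP (fun e => decide (key e ≤ key t)) := by
  induction acc with
  | nil => simp [PySem.List.insertBy]
  | cons e rest ih =>
    rw [List.pairwise_cons] at h
    obtain ⟨he, hrest⟩ := h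
    have hne : e ≠ t := fun hh => ht (hh ▸ List.mem_cons_self)
    have htr : t ∉ rest := fun hh => ht (List.mem_cons_of_mem _ hh)
    show List.idxOf t (if decide (key t < key e) = true then t :: e :: rest
          else e :: PySem.List.insertBy _ t rest) = _
    split_ifs with hc
    · simp only [decide_eq_true_eq] at hc
      rw [List.idxOf_cons_self, List.countP_cons]
      have h0 : List.countP (fun e => decide (key e ≤ key t)) rest = 0 := by
        rw [List.countP_eq_zero]
        intro a ha
        have := he a ha
        simp only [decide_eq_true_eq]
        omega
      simp only [h0, decide_eq_true_eq]
      rw [if_neg (by omega)]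
    · simp only [decide_eq_true_eq, not_lt] at hc
      rw [List.idxOf_cons_ne _ hne, ih hrest htr, List.countP_cons]
      simp [hc]

theorem pv_idxOf_insertBy_shift {α : Type} [BEq α] [LawfulBEq α] (key : α → Int) (t x : α) (acc : List α)
    (h : acc.Pairwise (fun p q => key p ≤ key q)) (ht : t ∈ acc) (hx : x ≠ t) :
    List.idxOf t (PySem.List.insertBy (fun p q => decide (key p < key q)) x acc)
      = List.idxOf t acc + (if key x < key t then 1 else 0) := by
  induction acc with
  | nil => simp at ht
  | cons e rest ih =>
    rw [List.pairwise_cons] at h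
    obtain ⟨he, hrest⟩ := h
    by_cases hc : key x < key e
    · rw [show PySem.List.insertBy (fun p q => decide (key p < key q)) x (e :: rest)
          = x :: e :: rest from by simp [PySem.List.insertBy, hc]]
      have hkt : key e ≤ key t := by
        rcases List.mem_cons.1 ht with rfl | hm
        · omega
        · exact he t hm
      rw [List.idxOf_cons_ne _ hx, if_pos (by omega)]
    · rw [show PySem.List.insertBy (fun p q => decide (key p < key q)) x (e :: rest)
          = e :: PySem.List.insertBy (fun p q => decide (key p < key q)) x rest from by
            simp [PySem.List.insertBy, hc]]
      simp only [not_lt] at hc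
      by_cases het : e = t
      · subst het
        rw [List.idxOf_cons_self, List.idxOf_cons_self, if_neg (by omega)]
      · have hm : t ∈ rest := by
          rcases List.mem_cons.1 ht with rfl | hm
          · exact absurd rfl (Ne.symm het)
          · exact hm
        rw [List.idxOf_cons_ne _ het, List.idxOf_cons_ne _ het, ih hrest hm]
        split_ifs <;> omega

theorem pv_idxOf_foldl_insertBy {α : Type} [BEq α] [LawfulBEq α] (key : α → Int) (t : α) (l : List α)
    (acc : List α) (h : acc.Pairwise (fun p q => key p ≤ key q)) (ht : t ∈ acc) (hl : t ∉ l) :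
    List.idxOf t (l.foldl (fun a x => PySem.List.insertBy (fun p q => decide (key p < key q)) x a) acc)
      = List.idxOf t acc + l.countP (fun e => decide (key e < key t)) := by
  induction l generalizing acc with
  | nil => simp
  | cons x rest ih =>
    have hxt : x ≠ t := fun hh => hl (hh ▸ List.mem_cons_self)
    have htr : t ∉ rest := fun hh => hl (List.mem_cons_of_mem _ hh)
    rw [List.foldl_cons,
      ih _ (pv_pairwise_insertBy key x acc h)
        ((PySem.List.mem_insertBy _ _ _ _).2 (Or.inr ht)) htr,
      pv_idxOf_insertBy_shift key t x acc h ht hxt, List.countP_cons]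
    simp only [decide_eq_true_eq]
    split_ifs <;> omega

-- ===== VERDICT (by name: the statement is the Claim_ definition above) =====
theorem get_ord4_rank_spec : Claim_equal_get_ord4_rank := by
  intro ord1 ord2 ord3 ord4 ord6 _
  unfold Spec_get_ord4_rank
  by_cases hg : ord3 + 1 > ord6 - 1 ∨ ord4 < ord3 + 1 ∨ ord4 > ord6 - 1
  · simp only [get_ord4_rank, get_ord4_rank_alt]
    rw [if_pos hg, if_pos hg]
  · simp only [not_or, not_lt] at hg
    obtain ⟨h1, h2, h3⟩ := hg
    have hg' : ¬(ord3 + 1 > ord6 - 1 ∨ ord4 < ord3 + 1 ∨ ord4 > ord6 - 1) := by omega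
    -- abbreviations
    have hr : PySem.List.pyRange (ord3 + 1) (ord6 - 1 + 1) 1
        = PySem.List.pyRange (ord3 + 1) ord4 1
          ++ ord4 :: PySem.List.pyRange (ord4 + 1) (ord6 - 1 + 1) 1 := by
      rw [PySem.List.pyRange_one_append (ord3 + 1) ord4 (ord6 - 1 + 1) (by omega) (by omega),
        PySem.List.pyRange_one_cons (a := ord4) (b := ord6 - 1 + 1) (by omega)]
    have hS := pv_score_eq ord3
    -- names
    set f : Int → Int × Int := fun o => (o, pvScoreA ord3 o) with hf
    set t : Int × Int := (ord4, pvScoreA ord3 ord4) with hts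
    set L1 : List (Int × Int) := (PySem.List.pyRange (ord3 + 1) ord4 1).map f with hL1
    set L2 : List (Int × Int) := (PySem.List.pyRange (ord4 + 1) (ord6 - 1 + 1) 1).map f with hL2
    have hm1 : ∀ p ∈ L1, p.1 < ord4 := by
      intro p hp
      rw [hL1] at hp
      obtain ⟨o, ho, rfl⟩ := List.mem_map.1 hp
      exact (PySem.List.mem_pyRange_one.1 ho).2
    have hm2 : ∀ p ∈ L2, ord4 < p.1 := by
      intro p hp
      rw [hL2] at hp
      obtain ⟨o, ho, rfl⟩ := List.mem_map.1 hp
      have := (PySem.List.mem_pyRange_one.1 ho).1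
      show ord4 < o
      omega
    have ht1 : t ∉ L1 := fun hh => absurd (hm1 t hh) (by simp [hts])
    have ht2 : t ∉ L2 := fun hh => absurd (hm2 t hh) (by simp [hts])
    -- the A side: 1 + (index of t in the stable-sorted candidate list)
    have hA : get_ord4_rank ord1 ord2 ord3 ord4 ord6
        = 0 + (List.idxOf t (PySem.List.sorted (L1 ++ t :: L2) (fun x => -x.2) false) : Int) + 1 := by
      simp only [get_ord4_rank]
      rw [if_neg hg', PySem.List.foldl_append_singleton_eq_map, List.nil_append, hr,
        List.map_append, List.map_cons]
      have hu : ∀ p ∈ PySem.List.sorted (L1 ++ t :: L2) (fun x => -x.2) false,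
          p.1 = t.1 → p = t := by
        intro p hp hp1
        rw [PySem.List.mem_sorted] at hp
        rcases List.mem_append.1 hp with hp | hp
        · have := hm1 p hp
          simp only [hts] at hp1
          omega
        · rcases List.mem_cons.1 hp with rfl | hp
          · rfl
          · have := hm2 p hp
            simp only [hts] at hp1
            omega
      have htm : t ∈ PySem.List.sorted (L1 ++ t :: L2) (fun x => -x.2) false := by
        rw [PySem.List.mem_sorted]
        exact List.mem_append.2 (Or.inr List.mem_cons_self)
      exact pv_find_eq_idx t _ 0 hu htm
    -- compute that index by stability
    have hidx : List.idxOf t (PySem.List.sorted (L1 ++ t :: L2) (fun x => -x.2) false)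
        = L1.countP (fun e => decide (-e.2 ≤ -t.2)) + L2.countP (fun e => decide (-e.2 < -t.2)) := by
      have hfold : PySem.List.sorted (L1 ++ t :: L2) (fun x : Int × Int => -x.2) false
          = L2.foldl (fun a x => PySem.List.insertBy
              (fun p q : Int × Int => decide (-p.2 < -q.2)) x a)
            (PySem.List.insertBy (fun p q : Int × Int => decide (-p.2 < -q.2)) t
              (PySem.List.sorted L1 (fun x : Int × Int => -x.2) false)) := by
        rw [PySem.List.sorted_eq_foldl_insertBy (L1 ++ t :: L2) (fun x : Int × Int => -x.2),
          List.foldl_append, List.foldl_cons,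
          PySem.List.sorted_eq_foldl_insertBy L1 (fun x : Int × Int => -x.2)]
      rw [hfold]
      have hpw1 : (PySem.List.sorted L1 (fun x : Int × Int => -x.2) false).Pairwise
          (fun p q : Int × Int => -p.2 ≤ -q.2) :=
        PySem.List.sorted_pairwise L1 (fun x : Int × Int => -x.2)
      have hts1 : t ∉ PySem.List.sorted L1 (fun x : Int × Int => -x.2) false := by
        rw [PySem.List.mem_sorted]; exact ht1
      have hpw2 : (PySem.List.insertBy (fun p q : Int × Int => decide (-p.2 < -q.2)) t
            (PySem.List.sorted L1 (fun x : Int × Int => -x.2) false)).Pairwise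
          (fun p q : Int × Int => -p.2 ≤ -q.2) :=
        pv_pairwise_insertBy (fun x : Int × Int => -x.2) t _ hpw1
      have hmem2 : t ∈ PySem.List.insertBy (fun p q : Int × Int => decide (-p.2 < -q.2)) t
            (PySem.List.sorted L1 (fun x : Int × Int => -x.2) false) :=
        (PySem.List.mem_insertBy _ _ _ _).2 (Or.inl rfl)
      rw [pv_idxOf_foldl_insertBy (fun x : Int × Int => -x.2) t L2 _ hpw2 hmem2 ht2,
        pv_idxOf_insertBy_self (fun x : Int × Int => -x.2) t _ hpw1 hts1,
        (PySem.List.sorted_perm L1 (fun x : Int × Int => -x.2) false).countP_eq]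
    -- the B side: 1 + a count over the whole range
    have hB : get_ord4_rank_alt ord1 ord2 ord3 ord4 ord6
        = 1 + ((PySem.List.pyRange (ord3 + 1) (ord6 - 1 + 1) 1).countP
            (fun o => decide (pvScoreA ord3 o > pvScoreA ord3 ord4
              ∨ (pvScoreA ord3 o = pvScoreA ord3 ord4 ∧ o < ord4))) : Int) := by
      simp only [get_ord4_rank_alt]
      rw [if_neg hg']
      have hbody : (fun (rank : Int) (o : Int) =>
            if pvBase.getD o 0 + PySem.Int.floordiv (pvGapB.getD (o - ord3) 0) 4
                > pvBase.getD ord4 0 + PySem.Int.floordiv (pvGapB.getD (ord4 - ord3) 0) 4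
              ∨ (pvBase.getD o 0 + PySem.Int.floordiv (pvGapB.getD (o - ord3) 0) 4
                  = pvBase.getD ord4 0 + PySem.Int.floordiv (pvGapB.getD (ord4 - ord3) 0) 4
                ∧ o < ord4) then rank + 1 else rank)
          = (fun (rank : Int) (o : Int) =>
            if pvScoreA ord3 o > pvScoreA ord3 ord4
              ∨ (pvScoreA ord3 o = pvScoreA ord3 ord4 ∧ o < ord4) then rank + 1 else rank) := by
        funext rank o
        rw [hS o, hS ord4]
        rfl
      rw [hbody, PySem.List.foldl_ite_add_one]
    rw [hA, hB, hidx, hr, List.countP_append, List.countP_cons]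
    have hc4 : (decide (pvScoreA ord3 ord4 > pvScoreA ord3 ord4
        ∨ (pvScoreA ord3 ord4 = pvScoreA ord3 ord4 ∧ ord4 < ord4))) = false := by
      simp
    rw [hc4, if_neg (by simp)]
    have hr1 : (PySem.List.pyRange (ord3 + 1) ord4 1).countP
          (fun o => decide (pvScoreA ord3 o > pvScoreA ord3 ord4
            ∨ (pvScoreA ord3 o = pvScoreA ord3 ord4 ∧ o < ord4)))
        = L1.countP (fun e => decide (-e.2 ≤ -t.2)) := by
      rw [hL1, List.countP_map]
      apply List.countP_congr
      intro o ho
      have hlt : o < ord4 := (PySem.List.mem_pyRange_one.1 ho).2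
      simp only [Function.comp, hf, hts, decide_eq_true_eq]
      constructor
      · intro hh; omega
      · intro hh; omega
    have hr2 : (PySem.List.pyRange (ord4 + 1) (ord6 - 1 + 1) 1).countP
          (fun o => decide (pvScoreA ord3 o > pvScoreA ord3 ord4
            ∨ (pvScoreA ord3 o = pvScoreA ord3 ord4 ∧ o < ord4)))
        = L2.countP (fun e => decide (-e.2 < -t.2)) := by
      rw [hL2, List.countP_map]
      apply List.countP_congr
      intro o ho
      have hgt : ord4 < o := by
        have := (PySem.List.mem_pyRange_one.1 ho).1
        omega
      simp only [Function.comp, hf, hts, decide_eq_true_eq]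
      constructor
      · intro hh; omega
      · intro hh; omega
    rw [hr1, hr2]
    push_cast
    ring
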